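-- pv_equiv track=rewrite | github.com/ccdlevi/MKDocs_POC | mkdocs_confluence_publisher.py | _fix_code_macros
-- ===== SOURCE A (Python) =====
-- def _fix_code_macros(content: str) -> str:
--     """Replace incompatible code language macros."""
--     # Map of incompatible languages to compatible ones
--     replacements = {
--         'json': 'yaml',
--         'dockerfile': 'bash',
--         'powershell': 'bash',
--     }
--
--     for incompatible, compatible in replacements.items():
--         pattern = f'<ac:parameter ac:name="language">{incompatible}</ac:parameter>'
--         replacement = f'<ac:parameter ac:name="language">{compatible}</ac:parameter>'
--         content = content.replace(pattern, replacement)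
--
--     return content
-- ===== SOURCE B (Python) =====
-- def _fix_code_macros(content: str) -> str:
--     """Replace incompatible code language macros in one left-to-right pass."""
--     PRE = '<ac:parameter ac:name="language">'
--     SUF = '</ac:parameter>'
--     replacements = {
--         'json': 'yaml',
--         'dockerfile': 'bash',
--         'powershell': 'bash',
--     }
--     out = []
--     i = 0
--     n = len(content)
--     while i < n:
--         matched = False
--         for incompatible, compatible in replacements.items():
--             pattern = PRE + incompatible + SUF
--             if content.startswith(pattern, i):
--                 out.append(PRE + compatible + SUF)
--                 i += len(pattern)
--                 matched = True
--                 break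
--         if not matched:
--             out.append(content[i])
--             i += 1
--     return ''.join(out)
-- ===== Notes on version B (the rewrite author's own statement) =====
-- stated objective: alternative
-- what changed: Replaces A's three sequential whole-string str.replace passes by a single left-to-right scan that tests the three full macro patterns at each position and emits the rebuilt macro or the current character.
import Mathlib
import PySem

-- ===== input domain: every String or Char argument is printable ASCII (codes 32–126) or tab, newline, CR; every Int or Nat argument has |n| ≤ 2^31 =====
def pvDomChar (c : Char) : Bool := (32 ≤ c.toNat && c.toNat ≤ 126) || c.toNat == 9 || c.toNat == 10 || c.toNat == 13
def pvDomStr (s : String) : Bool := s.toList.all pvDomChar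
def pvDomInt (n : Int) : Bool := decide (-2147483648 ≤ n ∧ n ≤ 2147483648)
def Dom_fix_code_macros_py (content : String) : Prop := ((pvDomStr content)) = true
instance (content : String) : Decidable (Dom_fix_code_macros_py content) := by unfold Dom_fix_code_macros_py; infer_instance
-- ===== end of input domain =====

-- B replaces A's three sequential whole-string replace passes by one left-to-right scan; objective: alternative (same result, single pass).

-- ===== PORT A =====
-- A: content.replace(pattern, replacement) once per entry of the dict, in insertion order.
def fix_code_macros_py (content : String) : String :=
  let c1 := PySem.Str.replace content
    "<ac:parameter ac:name=\"language\">json</ac:parameter>"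
    "<ac:parameter ac:name=\"language\">yaml</ac:parameter>"
  let c2 := PySem.Str.replace c1
    "<ac:parameter ac:name=\"language\">dockerfile</ac:parameter>"
    "<ac:parameter ac:name=\"language\">bash</ac:parameter>"
  let c3 := PySem.Str.replace c2
    "<ac:parameter ac:name=\"language\">powershell</ac:parameter>"
    "<ac:parameter ac:name=\"language\">bash</ac:parameter>"
  c3

-- ===== PORT B =====
-- the full patterns PRE + lang + SUF and replacements Source B builds, as list literals
def pvP1 : List Char := "<ac:parameter ac:name=\"language\">json</ac:parameter>".toList
def pvR1 : List Char := "<ac:parameter ac:name=\"language\">yaml</ac:parameter>".toList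
def pvP2 : List Char := "<ac:parameter ac:name=\"language\">dockerfile</ac:parameter>".toList
def pvP3 : List Char := "<ac:parameter ac:name=\"language\">powershell</ac:parameter>".toList
def pvRB : List Char := "<ac:parameter ac:name=\"language\">bash</ac:parameter>".toList

-- the (pattern, replacement) pairs Source B derives from its dict, in insertion order
def pvTableB : List (List Char × List Char) := [(pvP1, pvR1), (pvP2, pvRB), (pvP3, pvRB)]

-- Source B's inner for-loop: first pattern of the table matching at the current position
def pvFirstB (l : List Char) : List (List Char × List Char) → Option (List Char × Nat)
  | [] => none
  | (p, r) :: rest => if p.isPrefixOf l then some (r, p.length) else pvFirstB l rest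

-- Source B's while-loop over positions, as recursion on the remaining suffix
def pvScanB : List Char → List Char
  | [] => []
  | c :: t =>
    match pvFirstB (c :: t) pvTableB with
    | some (r, len) => r ++ pvScanB (t.drop (len - 1))
    | none => c :: pvScanB t
termination_by l => l.length
decreasing_by
  all_goals simp

def fix_code_macros_py_alt (content : String) : String :=
  String.ofList (pvScanB content.toList)

-- ===== PRECONDITION & SPEC =====
def Spec_fix_code_macros_py (content : String) (out : String) : Prop := out = fix_code_macros_py_alt content
instance (content : String) (out : String) : Decidable (Spec_fix_code_macros_py content out) := by unfold Spec_fix_code_macros_py; infer_instance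

-- ===== CLAIM (what is proved, stated in full; the proofs are below) =====
def Claim_equal_fix_code_macros_py : Prop := ∀ (content : String), Dom_fix_code_macros_py content → Spec_fix_code_macros_py content (fix_code_macros_py content)

-- ===== LEMMAS AND PROOFS =====

-- clean recursive form of one str.replace pass (proof helper)
def pvRepl (p r : List Char) : List Char → List Char
  | [] => []
  | c :: t =>
    if p.isPrefixOf (c :: t) then r ++ pvRepl p r (t.drop (p.length - 1))
    else c :: pvRepl p r t
termination_by l => l.length
decreasing_by
  all_goals simp

theorem pvGo_eq (old new : List Char) (hold : old ≠ []) :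
    ∀ (fuel : Nat) (l acc : List Char), l.length ≤ fuel →
      PySem.Chars.replace.go old new fuel l acc = acc.reverse ++ pvRepl old new l := by
  intro fuel
  induction fuel with
  | zero =>
    intro l acc h
    have : l = [] := by cases l <;> simp_all
    subst this; simp [PySem.Chars.replace.go, pvRepl]
  | succ n ih =>
    intro l acc h
    cases l with
    | nil => simp [PySem.Chars.replace.go, pvRepl]
    | cons c t =>
      by_cases hp : old.isPrefixOf (c :: t)
      · have hdrop : (c :: t).drop old.length = t.drop (old.length - 1) := by
          cases old with
          | nil => exact absurd rfl hold
          | cons o os => simp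
        rw [PySem.Chars.replace.go]
        simp only [hp, if_true, hdrop]
        rw [ih (t.drop (old.length - 1)) (new.reverse ++ acc)
            (by have := List.length_drop (l := t) (i := old.length - 1); simp at h ⊢; omega)]
        rw [pvRepl]
        simp [hp]
      · rw [PySem.Chars.replace.go, if_neg hp,
            ih t (c :: acc) (by simp at h; omega), pvRepl, if_neg hp]
        simp

theorem pvReplace_eq (s old new : List Char) (hold : old ≠ []) :
    PySem.Chars.replace s old new = pvRepl old new s := by
  rw [PySem.Chars.replace]
  have : old.isEmpty = false := by cases old <;> simp_all
  rw [this]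
  simpa using pvGo_eq old new hold s.length s [] (le_refl _)

-- two prefixes of the same list are comparable
theorem pvPrefix_cases {u v w : List Char} (h : u.isPrefixOf (v ++ w)) :
    u.isPrefixOf v ∨ v.isPrefixOf u := by
  rw [List.isPrefixOf_iff_prefix] at h ⊢
  rw [List.isPrefixOf_iff_prefix]
  exact (List.prefix_or_prefix_of_prefix h (List.prefix_append v w)).imp id id

-- skipping a block b inside which no occurrence of P can start
theorem pvRepl_skip (P R b : List Char)
    (H : ∀ k, k < b.length → ¬ P.isPrefixOf (b.drop k) ∧ ¬ (b.drop k).isPrefixOf P) :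
    ∀ w, pvRepl P R (b ++ w) = b ++ pvRepl P R w := by
  induction b with
  | nil => intro w; rfl
  | cons d b' ih =>
    intro w
    have h0 := H 0 (by simp)
    simp only [List.drop_zero] at h0
    have hnp : ¬ P.isPrefixOf (d :: (b' ++ w)) := by
      rw [← List.cons_append]
      intro hc
      rcases pvPrefix_cases hc with h | h
      · exact h0.1 h
      · exact h0.2 h
    rw [List.cons_append, pvRepl, if_neg hnp,
        ih (fun k hk => by have := H (k + 1) (by simp; omega); simpa using this) w]
    simp

-- a match on P ++ w consumes exactly P
theorem pvRepl_match (P R : List Char) (hP : P ≠ []) (w : List Char) :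
    pvRepl P R (P ++ w) = R ++ pvRepl P R w := by
  cases P with
  | nil => exact absurd rfl hP
  | cons p ps =>
    rw [List.cons_append, pvRepl]
    have hpre : (p :: ps).isPrefixOf (p :: (ps ++ w)) := by
      rw [List.isPrefixOf_iff_prefix]; exact ⟨w, by simp⟩
    simp only [hpre, if_true]
    congr 1
    congr 1
    simp

-- prefix reflection: a (suffix of a) pattern Q incompatible with the replacement R
-- is a prefix of the output of a pass only if it was a prefix of the input
theorem pvRepl_reflect (P R Q : List Char)
    (HQ : ∀ k, 1 ≤ k → k < Q.length → ¬ R.isPrefixOf (Q.drop k) ∧ ¬ (Q.drop k).isPrefixOf R) :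
    ∀ (l : List Char) (k : Nat), 1 ≤ k →
      (Q.drop k).isPrefixOf (pvRepl P R l) → (Q.drop k).isPrefixOf l := by
  intro l
  induction l with
  | nil => intro k hk h; simpa [pvRepl] using h
  | cons c t ih =>
    intro k hk h
    by_cases hkQ : Q.length ≤ k
    · simp [List.drop_eq_nil_of_le hkQ]
    · rw [Nat.not_le] at hkQ
      by_cases hp : P.isPrefixOf (c :: t)
      · rw [pvRepl] at h
        simp only [hp, if_true] at h
        rcases pvPrefix_cases h with h' | h'
        · exact absurd h' (HQ k hk hkQ).2
        · exact absurd h' (HQ k hk hkQ).1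
      · rw [pvRepl, if_neg hp] at h
        rw [List.isPrefixOf_iff_prefix] at h
        have hne : Q.drop k ≠ [] := by
          intro hnil
          have := congrArg List.length hnil
          simp at this; omega
        obtain ⟨d, q', hdq⟩ := List.exists_cons_of_ne_nil hne
        rw [hdq] at h
        rcases (List.cons_prefix_cons).mp h with ⟨hd, hq'⟩
        have hq'eq : q' = Q.drop (k + 1) := by
          have ht : (Q.drop k).tail = Q.drop (k + 1) := List.tail_drop
          rw [hdq] at ht; simpa using ht
        have := ih (k + 1) (by omega)
          (by rw [← hq'eq, List.isPrefixOf_iff_prefix]; exact hq')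
        rw [List.isPrefixOf_iff_prefix] at this ⊢
        rw [hdq, ← hq'eq] at *
        exact (List.cons_prefix_cons).mpr ⟨hd, this⟩

-- a pattern-tail Q.drop k (k ≥ 1) incompatible with R stays a prefix through a pass
theorem pvReflect_cons (P R Q : List Char)
    (HQ : ∀ k, 1 ≤ k → k < Q.length → ¬ R.isPrefixOf (Q.drop k) ∧ ¬ (Q.drop k).isPrefixOf R)
    (c : Char) (t : List Char) (h : Q.isPrefixOf (c :: pvRepl P R t)) :
    Q.isPrefixOf (c :: t) := by
  cases Q with
  | nil => simp
  | cons q qs =>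
    rw [List.isPrefixOf_iff_prefix] at h ⊢
    rcases List.cons_prefix_cons.mp h with ⟨hq, hqs⟩
    refine List.cons_prefix_cons.mpr ⟨hq, ?_⟩
    have := pvRepl_reflect P R (q :: qs) HQ t 1 (le_refl _)
      (by rw [List.isPrefixOf_iff_prefix]; simpa using hqs)
    rw [List.isPrefixOf_iff_prefix] at this
    simpa using this

theorem pvDrop_of_append (P : List Char) (hP : P ≠ []) (c : Char) (t t' : List Char)
    (heq : c :: t = P ++ t') : t.drop (P.length - 1) = t' := by
  cases P with
  | nil => exact absurd rfl hP
  | cons p ps =>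
    rw [List.cons_append, List.cons.injEq] at heq
    rw [heq.2]
    simp

theorem pvScanB_cons (c : Char) (t : List Char) :
    pvScanB (c :: t) = match pvFirstB (c :: t) pvTableB with
    | some (r, len) => r ++ pvScanB (t.drop (len - 1))
    | none => c :: pvScanB t := by
  rw [pvScanB]

theorem pvMain : ∀ (n : Nat) (l : List Char), l.length ≤ n →
    pvRepl pvP3 pvRB (pvRepl pvP2 pvRB (pvRepl pvP1 pvR1 l)) = pvScanB l := by
  intro n
  induction n with
  | zero =>
    intro l h
    have : l = [] := by cases l <;> simp_all
    subst this
    simp [pvRepl, pvScanB]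
  | succ n ih =>
    intro l hl
    cases l with
    | nil => simp [pvRepl, pvScanB]
    | cons c t =>
      by_cases h1 : pvP1.isPrefixOf (c :: t)
      · obtain ⟨t', heq⟩ := List.isPrefixOf_iff_prefix.mp h1
        have hlen : t'.length ≤ n := by
          have hP : (0:Nat) < pvP1.length := by decide
          have hleq := congrArg List.length heq
          simp only [List.length_append, List.length_cons] at hleq
          simp only [List.length_cons] at hl
          omega
        have hdrop : t.drop (pvP1.length - 1) = t' :=
          pvDrop_of_append pvP1 (by decide) c t t' heq.symm
        have L1 : pvRepl pvP1 pvR1 (c :: t) = pvR1 ++ pvRepl pvP1 pvR1 t' := by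
          rw [← heq]; exact pvRepl_match pvP1 pvR1 (by decide) t'
        rw [L1, pvRepl_skip pvP2 pvRB pvR1 (by decide) _,
            pvRepl_skip pvP3 pvRB pvR1 (by decide) _, ih t' hlen]
        have hf : pvFirstB (c :: t) pvTableB = some (pvR1, pvP1.length) := by
          simp only [pvFirstB, pvTableB]
          rw [if_pos h1]
        rw [pvScanB_cons, hf]
        show pvR1 ++ pvScanB t' = pvR1 ++ pvScanB (t.drop (pvP1.length - 1))
        rw [hdrop]
      · by_cases h2 : pvP2.isPrefixOf (c :: t)
        · obtain ⟨t', heq⟩ := List.isPrefixOf_iff_prefix.mp h2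
          have hlen : t'.length ≤ n := by
            have hP : (0:Nat) < pvP2.length := by decide
            have hleq := congrArg List.length heq
            simp only [List.length_append, List.length_cons] at hleq
            simp only [List.length_cons] at hl
            omega
          have hdrop : t.drop (pvP2.length - 1) = t' :=
            pvDrop_of_append pvP2 (by decide) c t t' heq.symm
          have L1 : pvRepl pvP1 pvR1 (c :: t) = pvP2 ++ pvRepl pvP1 pvR1 t' := by
            rw [← heq]; exact pvRepl_skip pvP1 pvR1 pvP2 (by decide) t'
          rw [L1, pvRepl_match pvP2 pvRB (by decide) _,
              pvRepl_skip pvP3 pvRB pvRB (by decide) _, ih t' hlen]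
          have hf : pvFirstB (c :: t) pvTableB = some (pvRB, pvP2.length) := by
            simp only [pvFirstB, pvTableB]
            rw [if_neg h1, if_pos h2]
          rw [pvScanB_cons, hf]
          show pvRB ++ pvScanB t' = pvRB ++ pvScanB (t.drop (pvP2.length - 1))
          rw [hdrop]
        · by_cases h3 : pvP3.isPrefixOf (c :: t)
          · obtain ⟨t', heq⟩ := List.isPrefixOf_iff_prefix.mp h3
            have hlen : t'.length ≤ n := by
              have hP : (0:Nat) < pvP3.length := by decide
              have hleq := congrArg List.length heq
              simp only [List.length_append, List.length_cons] at hleq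
              simp only [List.length_cons] at hl
              omega
            have hdrop : t.drop (pvP3.length - 1) = t' :=
              pvDrop_of_append pvP3 (by decide) c t t' heq.symm
            have L1 : pvRepl pvP1 pvR1 (c :: t) = pvP3 ++ pvRepl pvP1 pvR1 t' := by
              rw [← heq]; exact pvRepl_skip pvP1 pvR1 pvP3 (by decide) t'
            have L2 : pvRepl pvP2 pvRB (pvP3 ++ pvRepl pvP1 pvR1 t')
                = pvP3 ++ pvRepl pvP2 pvRB (pvRepl pvP1 pvR1 t') :=
              pvRepl_skip pvP2 pvRB pvP3 (by decide) _
            rw [L1, L2, pvRepl_match pvP3 pvRB (by decide) _, ih t' hlen]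
            have hf : pvFirstB (c :: t) pvTableB = some (pvRB, pvP3.length) := by
              simp only [pvFirstB, pvTableB]
              rw [if_neg h1, if_neg h2, if_pos h3]
            rw [pvScanB_cons, hf]
            show pvRB ++ pvScanB t' = pvRB ++ pvScanB (t.drop (pvP3.length - 1))
            rw [hdrop]
          · have e1 : pvRepl pvP1 pvR1 (c :: t) = c :: pvRepl pvP1 pvR1 t := by
              rw [pvRepl, if_neg h1]
            have hn2 : ¬ pvP2.isPrefixOf (c :: pvRepl pvP1 pvR1 t) := fun hc =>
              h2 (pvReflect_cons pvP1 pvR1 pvP2 (by decide) c t hc)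
            have e2 : pvRepl pvP2 pvRB (c :: pvRepl pvP1 pvR1 t)
                = c :: pvRepl pvP2 pvRB (pvRepl pvP1 pvR1 t) := by
              rw [pvRepl, if_neg hn2]
            have hn3 : ¬ pvP3.isPrefixOf (c :: pvRepl pvP2 pvRB (pvRepl pvP1 pvR1 t)) := fun hc =>
              h3 (pvReflect_cons pvP1 pvR1 pvP3 (by decide) c t
                (pvReflect_cons pvP2 pvRB pvP3 (by decide) c (pvRepl pvP1 pvR1 t) hc))
            have e3 : pvRepl pvP3 pvRB (c :: pvRepl pvP2 pvRB (pvRepl pvP1 pvR1 t))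
                = c :: pvRepl pvP3 pvRB (pvRepl pvP2 pvRB (pvRepl pvP1 pvR1 t)) := by
              rw [pvRepl, if_neg hn3]
            rw [e1, e2, e3, ih t (by simp at hl; omega)]
            have hf : pvFirstB (c :: t) pvTableB = none := by
              simp only [pvFirstB, pvTableB]
              rw [if_neg h1, if_neg h2, if_neg h3]
            rw [pvScanB_cons, hf]

-- ===== VERDICT (by name: the statement is the Claim_ definition above) =====
theorem fix_code_macros_py_spec : Claim_equal_fix_code_macros_py := by
  intro content _
  unfold Spec_fix_code_macros_py fix_code_macros_py fix_code_macros_py_alt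
  simp only [PySem.Str.replace, String.toList_ofList]
  rw [pvReplace_eq _ _ _ (by decide), pvReplace_eq _ _ _ (by decide),
      pvReplace_eq _ _ _ (by decide)]
  exact congrArg String.ofList (pvMain content.toList.length content.toList (le_refl _))
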